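-- pv_equiv track=rewrite | github.com/raspverry/jp_hide_text | japanese_hash.py | _restore_format
-- ===== SOURCE A (Python) =====
-- def _restore_format(amount: str, hashed: str) -> str:
--     """金額の原本フォーマット(コンマなど)の復元"""
--     # 元の金額からコンマの位置を探す
--     comma_positions = [i for i, char in enumerate(amount) if char == ","]
--     if not comma_positions:
--         return hashed
--
--     # ハッシュされた数字にコンマを挿入
--     result = list(hashed.replace(",", ""))
--     offset = 0
--     for pos in comma_positions:
--         if pos + offset < len(result):
--             result.insert(pos + offset, ",")
--             offset += 1
--
--     return "".join(result)
-- ===== SOURCE B (Python) =====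
-- def _restore_format(amount: str, hashed: str) -> str:
--     """Rebuild comma placement with a precomputed index set and one forward pass."""
--     comma_positions = [i for i, char in enumerate(amount) if char == ","]
--     if not comma_positions:
--         return hashed
--     digits = hashed.replace(",", "")
--     d = len(digits)
--     commas = {p + j for j, p in enumerate(comma_positions) if p < d}
--     out = []
--     k = 0
--     for i in range(d + len(commas)):
--         if i in commas:
--             out.append(",")
--         else:
--             out.append(digits[k])
--             k += 1
--     return "".join(out)
-- ===== Notes on version B (the rewrite author's own statement) =====
-- stated objective: alternative
-- what changed: Replaces the repeated in-place list.insert-with-offset loop by precomputing the set of final comma indices {p+j : j-th comma position p of amount, p < len(stripped digits)} and building the output in a single forward pass that interleaves commas and digits.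
import Mathlib
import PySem

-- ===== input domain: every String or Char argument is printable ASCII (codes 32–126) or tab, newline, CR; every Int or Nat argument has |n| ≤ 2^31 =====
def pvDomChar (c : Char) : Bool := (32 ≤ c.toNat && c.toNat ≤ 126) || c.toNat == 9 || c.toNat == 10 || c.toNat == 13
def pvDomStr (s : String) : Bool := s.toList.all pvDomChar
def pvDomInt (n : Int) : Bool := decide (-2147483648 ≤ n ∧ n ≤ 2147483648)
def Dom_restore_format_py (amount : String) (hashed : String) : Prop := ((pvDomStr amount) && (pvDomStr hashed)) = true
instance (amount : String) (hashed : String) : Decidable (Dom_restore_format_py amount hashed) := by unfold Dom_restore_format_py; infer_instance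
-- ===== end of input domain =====

-- B replaces A's offset-tracking list.insert loop by a precomputed set of final comma
-- indices and one forward pass interleaving commas and digits (alternative algorithm).

-- ===== PORT A =====
def restore_format_py (amount : String) (hashed : String) : String :=
  let comma_positions : List Int :=
    ((PySem.List.enumerate amount.toList 0).filter (fun p => p.2 == ',')).map Prod.fst
  if comma_positions = [] then hashed
  else
    let result0 : List Char := (PySem.Str.replace hashed "," "").toList
    let st := comma_positions.foldl
      (fun (st : List Char × Int) pos =>
        if pos + st.2 < PySem.List.len st.1 then
          (PySem.List.insert st.1 (pos + st.2) ',', st.2 + 1)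
        else st)
      (result0, 0)
    String.ofList st.1

-- ===== PORT B =====
def restore_format_py_alt (amount : String) (hashed : String) : String :=
  let comma_positions : List Int :=
    ((PySem.List.enumerate amount.toList 0).filter (fun p => p.2 == ',')).map Prod.fst
  if comma_positions = [] then hashed
  else
    let digits : List Char := (PySem.Str.replace hashed "," "").toList
    let d : Int := PySem.List.len digits
    let commas : PySem.Set Int := PySem.Set.ofList
      (((PySem.List.enumerate comma_positions 0).filter (fun jp => jp.2 < d)).map
        (fun jp => jp.2 + jp.1))
    -- digits[k]: the index k is in range on every reachable state, ported with default ' '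
    let st := (PySem.List.pyRange 0 (d + PySem.Set.len commas) 1).foldl
      (fun (st : List Char × Int) i =>
        if PySem.Set.contains commas i then (st.1 ++ [','], st.2)
        else (st.1 ++ [PySem.List.pyGetD digits st.2 ' '], st.2 + 1))
      ([], 0)
    String.ofList st.1

-- ===== PRECONDITION & SPEC =====
def Spec_restore_format_py (amount : String) (hashed : String) (out : String) : Prop := out = restore_format_py_alt amount hashed
instance (amount : String) (hashed : String) (out : String) : Decidable (Spec_restore_format_py amount hashed out) := by unfold Spec_restore_format_py; infer_instance

-- ===== CLAIM (what is proved, stated in full; the proofs are below) =====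
def Claim_equal_restore_format_py : Prop := ∀ (amount : String) (hashed : String), Dom_restore_format_py amount hashed → Spec_restore_format_py amount hashed (restore_format_py amount hashed)

-- ===== LEMMAS AND PROOFS =====

-- Nat-side model of A's loop step: insert ',' at p+offset when it fits
def pvInsIdx (r : List Char) (q : Nat) : List Char := r.take q ++ ',' :: r.drop q

def pvNatStep (st : List Char × Nat) (p : Nat) : List Char × Nat :=
  if p + st.2 < st.1.length then (pvInsIdx st.1 (p + st.2), st.2 + 1) else st

-- final comma indices: the j-th qualifying position p (p < d) lands at index p + j
def pvQlist (d : Nat) : List Nat → Nat → List Nat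
  | [], _ => []
  | p :: ps, j => if p < d then (p + j) :: pvQlist d ps (j + 1) else []

-- number of non-comma slots below index i
def pvCnt (S : List Nat) (i : Nat) : Nat := (List.range i).countP (fun j => j ∉ S)

-- the merged output, described index by index
def pvOut (ds : List Char) (S : List Nat) : List Char :=
  (List.range (ds.length + S.length)).map
    (fun i => if i ∈ S then ',' else ds.getD (pvCnt S i) ' ')

-- Nat-side model of B's loop step
def pvBStep (S : List Nat) (ds : List Char) (st : List Char × Nat) (i : Nat) : List Char × Nat :=
  if i ∈ S then (st.1 ++ [','], st.2) else (st.1 ++ [ds.getD st.2 ' '], st.2 + 1)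

-- the two ports' loop bodies, named (definitionally equal to the lambdas in the ports)
def pvIntStepA (st : List Char × Int) (pos : Int) : List Char × Int :=
  if pos + st.2 < PySem.List.len st.1 then
    (PySem.List.insert st.1 (pos + st.2) ',', st.2 + 1)
  else st

def pvIntStepB (commas : List Int) (ds : List Char) (st : List Char × Int) (i : Int) : List Char × Int :=
  if PySem.Set.contains commas i then (st.1 ++ [','], st.2)
  else (st.1 ++ [PySem.List.pyGetD ds st.2 ' '], st.2 + 1)

theorem pvCnt_succ (S : List Nat) (n : Nat) : pvCnt S (n+1) = pvCnt S n + (if n ∈ S then 0 else 1) := by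
  simp only [pvCnt, List.range_succ, List.countP_append]
  split <;> simp [*]

theorem pvCnt_of_ge (T : List Nat) (i : Nat) (h : ∀ q ∈ T, ¬ q < i) : pvCnt T i = i := by
  have h2 : ∀ j ∈ List.range i, ((fun j => !decide (j ∈ T)) j) = true := by
    intro j hj; simp only [List.mem_range] at hj
    simp only [Bool.not_eq_true', decide_eq_false_iff_not]; intro hmem; exact h j hmem hj
  simp only [pvCnt, decide_not]
  rw [List.countP_eq_length.mpr h2, List.length_range]

theorem pvCnt_cons (p : Nat) (S : List Nat) (hgt : ∀ q ∈ S, p < q) :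
    ∀ i, p < i → pvCnt (p::S) i + 1 = pvCnt S i ∧ p ≤ pvCnt (p::S) i := by
  intro i hi
  induction i with
  | zero => omega
  | succ n ih =>
    rcases Nat.lt_or_ge p n with h | h
    · obtain ⟨h1, h2⟩ := ih h
      have hne : n ≠ p := by omega
      rw [pvCnt_succ, pvCnt_succ]
      by_cases hm : n ∈ S <;> simp [hm, hne] <;> omega
    · have hn : n = p := by omega
      subst hn
      have e1 : pvCnt S n = n := pvCnt_of_ge S n (fun q hq => by have := hgt q hq; omega)
      have e2 : pvCnt (n::S) n = n := pvCnt_of_ge _ n (by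
        intro q hq
        rcases List.mem_cons.mp hq with h' | h'
        · omega
        · have := hgt q h'; omega)
      rw [pvCnt_succ, pvCnt_succ, e1, e2]
      have hns : ¬ n ∈ S := fun hm => absurd (hgt n hm) (lt_irrefl n)
      simp [hns]

theorem pvInsIdx_length (ds : List Char) (p : Nat) (_hp : p ≤ ds.length) :
    (pvInsIdx ds p).length = ds.length + 1 := by
  simp [pvInsIdx]

theorem pvInsIdx_getD_lt (ds : List Char) (p m : Nat) (hp : p ≤ ds.length) (hm : m < p) :
    (pvInsIdx ds p).getD m ' ' = ds.getD m ' ' := by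
  have hl : (ds.take p).length = p := by simp [hp]
  rw [pvInsIdx, List.getD_eq_getElem?_getD, List.getElem?_append_left (by omega),
    List.getElem?_take_of_lt hm, List.getD_eq_getElem?_getD]

theorem pvInsIdx_getD_self (ds : List Char) (p : Nat) (hp : p ≤ ds.length) :
    (pvInsIdx ds p).getD p ' ' = ',' := by
  have hl : (ds.take p).length = p := by simp [hp]
  simp [pvInsIdx, List.getD_eq_getElem?_getD, List.getElem?_append_right, hl]

theorem pvInsIdx_getD_gt (ds : List Char) (p m : Nat) (hp : p ≤ ds.length) (hm : p ≤ m) :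
    (pvInsIdx ds p).getD (m+1) ' ' = ds.getD m ' ' := by
  have hl : (ds.take p).length = p := by simp [hp]
  rw [pvInsIdx, List.getD_eq_getElem?_getD, List.getElem?_append_right (by omega), hl]
  have h2 : m + 1 - p = (m - p) + 1 := by omega
  rw [h2]
  simp only [List.getElem?_cons_succ, List.getElem?_drop, List.getD_eq_getElem?_getD]
  congr 2; omega

theorem pvOut_nil (ds : List Char) : pvOut ds [] = ds := by
  have h : ∀ i, pvCnt [] i = i := by intro i; simp [pvCnt]
  unfold pvOut
  apply List.ext_getElem
  · simp
  · intro i h1 h2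
    simp [h, List.getD_eq_getElem?_getD, h2]

theorem pvOut_cons (ds : List Char) (p : Nat) (S : List Nat)
    (hp : p < ds.length) (hgt : ∀ q ∈ S, p < q) :
    pvOut ds (p :: S) = pvOut (pvInsIdx ds p) S := by
  have hple : p ≤ ds.length := le_of_lt hp
  have hlen : (pvInsIdx ds p).length = ds.length + 1 := pvInsIdx_length ds p hple
  unfold pvOut
  rw [hlen]
  have hn : ds.length + (p :: S).length = ds.length + 1 + S.length := by simp; omega
  rw [hn]
  apply List.map_congr_left
  intro i _
  by_cases hiS : i ∈ S
  · have : i ∈ p :: S := List.mem_cons_of_mem _ hiS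
    simp [hiS, this]
  · by_cases hip : i = p
    · subst hip
      have h1 : i ∈ i :: S := List.mem_cons_self
      have h2 : pvCnt S i = i := pvCnt_of_ge S i (fun q hq => by have := hgt q hq; omega)
      rw [if_pos h1, if_neg hiS, h2, pvInsIdx_getD_self ds i hple]
    · have hnc : ¬ i ∈ p :: S := by simp [hip, hiS]
      rcases Nat.lt_or_ge i p with h | h
      · have c1 : pvCnt (p::S) i = i := pvCnt_of_ge _ i (by
          intro q hq; rcases List.mem_cons.mp hq with h' | h'
          · omega
          · have := hgt q h'; omega)
        have c2 : pvCnt S i = i := pvCnt_of_ge S i (fun q hq => by have := hgt q hq; omega)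
        rw [if_neg hnc, if_neg hiS, c1, c2, pvInsIdx_getD_lt ds p i hple h]
      · have hpi : p < i := by omega
        obtain ⟨h1, h2⟩ := pvCnt_cons p S hgt i hpi
        have := pvInsIdx_getD_gt ds p (pvCnt (p::S) i) hple h2
        rw [if_neg hnc, if_neg hiS, ← h1, this]

theorem pvQlist_mem_gt (d : Nat) (ps : List Nat) :
    ∀ (j a : Nat), (∀ x ∈ ps, a < x) → ∀ q ∈ pvQlist d ps j, a + j < q := by
  induction ps with
  | nil => intro j a _ q hq; simp [pvQlist] at hq
  | cons p ps ih =>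
    intro j a ha q hq
    simp only [pvQlist] at hq
    split at hq
    · rcases List.mem_cons.mp hq with h | h
      · have := ha p List.mem_cons_self; omega
      · have := ih (j+1) a (fun x hx => ha x (List.mem_cons_of_mem _ hx)) q h
        omega
    · simp at hq

theorem pvQlist_pairwise (d : Nat) (ps : List Nat) :
    ∀ j, ps.Pairwise (· < ·) → (pvQlist d ps j).Pairwise (· < ·) := by
  induction ps with
  | nil => intro j _; simp [pvQlist]
  | cons p ps ih =>
    intro j hs
    obtain ⟨hhead, htail⟩ := List.pairwise_cons.mp hs
    simp only [pvQlist]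
    split
    · apply List.pairwise_cons.mpr
      refine ⟨?_, ih (j+1) htail⟩
      intro q hq
      have := pvQlist_mem_gt d ps (j+1) p hhead q hq
      omega
    · exact List.Pairwise.nil

theorem pvQlist_shift (d : Nat) (ps : List Nat) :
    ∀ j, pvQlist (d + 1) (ps.map (· + 1)) j = pvQlist d ps (j + 1) := by
  induction ps with
  | nil => intro j; simp [pvQlist]
  | cons p ps ih =>
    intro j
    simp only [List.map_cons, pvQlist]
    simp only [Nat.add_lt_add_iff_right]
    split
    · rw [ih (j+1)]; congr 1; omega
    · rfl

theorem pvShiftA (ps : List Nat) :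
    ∀ (r : List Char) (o c : Nat),
      ps.foldl pvNatStep (r, o + c) =
        (((ps.map (· + c)).foldl pvNatStep (r, o)).1, ((ps.map (· + c)).foldl pvNatStep (r, o)).2 + c) := by
  induction ps with
  | nil => intro r o c; simp
  | cons p ps ih =>
    intro r o c
    simp only [List.map_cons, List.foldl_cons, pvNatStep]
    have hg : (p + (o + c) < r.length) = (p + c + o < r.length) := by
      congr 1; omega
    simp only [hg]
    split
    · have : p + (o + c) = p + c + o := by omega
      rw [this]
      have h2 := ih (pvInsIdx r (p + c + o)) (o+1) c
      rw [show o + 1 + c = o + c + 1 by omega] at h2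
      exact h2
    · exact ih r o c

theorem pvNoop (ps : List Nat) :
    ∀ (r : List Char) (o : Nat), (∀ x ∈ ps, r.length ≤ x + o) → ps.foldl pvNatStep (r, o) = (r, o) := by
  induction ps with
  | nil => intro r o _; simp
  | cons p ps ih =>
    intro r o h
    simp only [List.foldl_cons, pvNatStep]
    rw [if_neg (by have := h p List.mem_cons_self; omega)]
    exact ih r o (fun x hx => h x (List.mem_cons_of_mem _ hx))

theorem pvMainA_aux (n : Nat) :
    ∀ (ps : List Nat) (ds : List Char), ps.length ≤ n → ps.Pairwise (· < ·) →
      (ps.foldl pvNatStep (ds, 0)).1 = pvOut ds (pvQlist ds.length ps 0) := by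
  induction n with
  | zero =>
    intro ps ds hl _
    have : ps = [] := List.length_eq_zero_iff.mp (by omega)
    subst this; simp [pvQlist, pvOut_nil]
  | succ n ih =>
    intro ps ds hl hs
    match ps with
    | [] => simp [pvQlist, pvOut_nil]
    | p :: ps =>
    obtain ⟨hhead, htail⟩ := List.pairwise_cons.mp hs
    have hlen' : (ps.map (· + 1)).length ≤ n := by simp at hl ⊢; omega
    simp only [List.foldl_cons, pvNatStep]
    by_cases hp : p + 0 < ds.length
    · rw [if_pos hp]
      have hp' : p < ds.length := by omega
      have h1 : ps.foldl pvNatStep (pvInsIdx ds (p + 0), 0 + 1) =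
          (((ps.map (· + 1)).foldl pvNatStep (pvInsIdx ds (p + 0), 0)).1,
           ((ps.map (· + 1)).foldl pvNatStep (pvInsIdx ds (p + 0), 0)).2 + 1) := pvShiftA ps _ 0 1
      rw [h1]
      have hsort : (ps.map (· + 1)).Pairwise (· < ·) := by
        apply List.Pairwise.map _ _ htail
        intro a b hab; omega
      have h2 := ih (ps.map (· + 1)) (pvInsIdx ds (p + 0)) hlen' hsort
      simp only [Nat.add_zero] at *
      rw [h2, pvInsIdx_length ds p (le_of_lt hp'), pvQlist_shift]
      have hq : pvQlist ds.length (p :: ps) 0 = p :: pvQlist ds.length ps 1 := by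
        simp [pvQlist, hp']
      rw [hq, pvOut_cons ds p _ hp']
      intro q hq'
      have := pvQlist_mem_gt ds.length ps 1 p hhead q hq'
      omega
    · rw [if_neg hp]
      have hq : pvQlist ds.length (p :: ps) 0 = [] := by
        simp [pvQlist]; omega
      rw [pvNoop ps ds 0 (fun x hx => by have := hhead x hx; omega), hq, pvOut_nil]

theorem pvMainB (S : List Nat) (ds : List Char) (n : Nat) :
    ((List.range n).foldl (pvBStep S ds) ([], 0)) =
      ((List.range n).map (fun i => if i ∈ S then ',' else ds.getD (pvCnt S i) ' '), pvCnt S n) := by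
  induction n with
  | zero => simp [pvCnt]
  | succ n ih =>
    rw [List.range_succ, List.foldl_append, ih, List.map_append, pvCnt_succ]
    by_cases h : n ∈ S <;> simp [pvBStep, h]

theorem pvTransA (ps : List Nat) :
    ∀ (r : List Char) (o : Nat),
      ((List.map (fun (n:Nat) => (n : Int)) ps).foldl pvIntStepA (r, (o : Int)))
      = ((ps.foldl pvNatStep (r, o)).1, ((ps.foldl pvNatStep (r, o)).2 : Int)) := by
  induction ps with
  | nil => intro r o; simp
  | cons p ps ih =>
    intro r o
    simp only [List.map_cons, List.foldl_cons]
    by_cases h : p + o < r.length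
    · have hstep : pvIntStepA (r, (o : Int)) (p : Int) = (pvInsIdx r (p + o), ((o + 1 : Nat) : Int)) := by
        unfold pvIntStepA
        rw [PySem.List.len_eq, if_pos (by push_cast; omega)]
        rw [show ((p:Int) + (o:Int)) = ((p + o : Nat) : Int) by push_cast; ring,
          PySem.List.insert_natCast r (p+o) ',' (by omega)]
        rw [show ((o:Int) + 1) = ((o + 1 : Nat) : Int) by push_cast; ring]
        rfl
      rw [hstep, ih (pvInsIdx r (p+o)) (o+1)]
      simp only [pvNatStep, if_pos h]
    · have hstep : pvIntStepA (r, (o : Int)) (p : Int) = (r, (o : Int)) := by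
        unfold pvIntStepA
        rw [PySem.List.len_eq, if_neg (by push_cast; omega)]
      rw [hstep, ih r o]
      simp only [pvNatStep, if_neg h]

theorem pvTransB (S : List Nat) (ds : List Char) (l : List Nat) :
    ∀ (out : List Char) (k : Nat),
      ((List.map (fun (n:Nat) => (n : Int)) l).foldl
          (pvIntStepB (List.map (fun (n:Nat) => (n : Int)) S) ds) (out, (k : Int)))
      = ((l.foldl (pvBStep S ds) (out, k)).1, ((l.foldl (pvBStep S ds) (out, k)).2 : Int)) := by
  induction l with
  | nil => intro out k; simp
  | cons i l ih =>
    intro out k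
    simp only [List.map_cons, List.foldl_cons]
    have hmem : (PySem.Set.contains (List.map (fun (n:Nat) => (n : Int)) S) (i : Int) = true) ↔ i ∈ S := by
      rw [PySem.Set.contains_iff]
      constructor
      · intro h; obtain ⟨a, ha, he⟩ := List.mem_map.mp h
        have : a = i := by exact_mod_cast he
        rwa [← this]
      · intro h; exact List.mem_map.mpr ⟨i, h, rfl⟩
    by_cases h : i ∈ S
    · have hstep : pvIntStepB (List.map (fun (n:Nat) => (n : Int)) S) ds (out, (k:Int)) (i:Int)
          = (out ++ [','], (k : Int)) := by
        unfold pvIntStepB; rw [if_pos (hmem.mpr h)]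
      rw [hstep, ih]
      simp only [pvBStep, if_pos h]
    · have hstep : pvIntStepB (List.map (fun (n:Nat) => (n : Int)) S) ds (out, (k:Int)) (i:Int)
          = (out ++ [ds.getD k ' '], ((k + 1 : Nat) : Int)) := by
        unfold pvIntStepB
        rw [if_neg (fun hc => h (hmem.mp hc)), PySem.List.pyGetD_natCast]
        rw [show ((k:Int) + 1) = ((k + 1 : Nat) : Int) by push_cast; ring]
      rw [hstep, ih]
      simp only [pvBStep, if_neg h]

theorem pvEnumFilterNone (l : List Int) (dI : Int) (h : ∀ x ∈ l, ¬ x < dI) :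
    ∀ (s : Int), (PySem.List.enumerate l s).filter (fun jp => jp.2 < dI) = [] := by
  intro s
  apply List.filter_eq_nil_iff.mpr
  intro jp hjp
  obtain ⟨k, hk, he⟩ := (PySem.List.mem_enumerate_iff l s jp).mp hjp
  subst he
  simpa using h _ (List.getElem_mem hk)

theorem pvLemE (d : Nat) (cps : List Int) :
    ∀ (j : Nat), cps.Pairwise (· < ·) → (∀ p ∈ cps, 0 ≤ p) →
      ((PySem.List.enumerate cps (j : Int)).filter (fun jp => jp.2 < (d : Int))).map
          (fun jp => jp.2 + jp.1)
        = List.map (fun (n:Nat) => (n : Int)) (pvQlist d (cps.map Int.toNat) j) := by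
  induction cps with
  | nil => intro j _ _; simp [PySem.List.enumerate_nil, pvQlist]
  | cons p ps ih =>
    intro j hs hnn
    obtain ⟨hhead, htail⟩ := List.pairwise_cons.mp hs
    have hp0 : 0 ≤ p := hnn p List.mem_cons_self
    rw [PySem.List.enumerate_cons]
    simp only [List.map_cons, pvQlist, List.filter_cons]
    by_cases h : p < (d : Int)
    · have hNat : p.toNat < d := by omega
      rw [if_pos (by simpa using h)]
      simp only [List.map_cons]
      rw [show ((j:Int) + 1) = ((j+1 : Nat) : Int) by push_cast; ring,
        ih (j+1) htail (fun q hq => le_of_lt (lt_of_le_of_lt hp0 (hhead q hq)))]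
      rw [if_pos hNat]
      simp only [List.map_cons]
      congr 1
      push_cast; omega
    · have hNat : ¬ p.toNat < d := by omega
      rw [if_neg (by simpa using h), if_neg hNat]
      rw [pvEnumFilterNone ps (d:Int) (fun x hx => by have := hhead x hx; omega) ((j:Int)+1)]
      rfl

-- ===== VERDICT (by name: the statement is the Claim_ definition above) =====
theorem restore_format_py_spec : Claim_equal_restore_format_py := by
  intro amount hashed _
  unfold Spec_restore_format_py restore_format_py restore_format_py_alt
  set cps : List Int :=
    ((PySem.List.enumerate amount.toList 0).filter (fun p => p.2 == ',')).map Prod.fst with hcps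
  by_cases hc : cps = []
  · rw [if_pos hc, if_pos hc]
  · rw [if_neg hc, if_neg hc]
    have hsort : cps.Pairwise (· < ·) := by
      rw [hcps]
      apply List.pairwise_map.mpr
      exact (PySem.List.pairwise_lt_enumerate amount.toList 0).filter _
    have hnn : ∀ p ∈ cps, 0 ≤ p := by
      intro p hp
      rw [hcps] at hp
      obtain ⟨q, hq, he⟩ := List.mem_map.mp hp
      obtain ⟨k, hk, he2⟩ := (PySem.List.mem_enumerate_iff _ _ _).mp (List.mem_of_mem_filter hq)
      subst he; rw [he2]; simp
    set ds : List Char := (PySem.Str.replace hashed "," "").toList with hds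
    set cpsN : List Nat := cps.map Int.toNat with hcpsN
    have hcast : List.map (fun (n:Nat) => (n : Int)) cpsN = cps := by
      rw [hcpsN, List.map_map]
      have : ∀ p ∈ cps, ((fun (n:Nat) => (n:Int)) ∘ Int.toNat) p = p := by
        intro p hp; simp [Int.toNat_of_nonneg (hnn p hp)]
      rw [List.map_congr_left this]
      simp
    have hsortN : cpsN.Pairwise (· < ·) := by
      rw [hcpsN]
      apply List.pairwise_map.mpr
      apply List.Pairwise.imp_of_mem _ hsort
      intro a b ha hb hab
      have := hnn a ha
      omega
    set S : List Nat := pvQlist ds.length cpsN 0 with hS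
    have hSsort : S.Pairwise (· < ·) := pvQlist_pairwise ds.length cpsN 0 hsortN
    have hA : (cps.foldl pvIntStepA (ds, ((0:Nat) : Int))).1 = pvOut ds S := by
      rw [← hcast, pvTransA cpsN ds 0]
      exact pvMainA_aux cpsN.length cpsN ds le_rfl hsortN
    have hL : ((PySem.List.enumerate cps ((0:Nat):Int)).filter
          (fun jp => jp.2 < PySem.List.len ds)).map (fun jp => jp.2 + jp.1)
        = List.map (fun (n:Nat) => (n : Int)) S := by
      rw [PySem.List.len_eq]
      exact pvLemE ds.length cps 0 hsort hnn
    have hnodupL : (List.map (fun (n:Nat) => (n : Int)) S).Nodup := by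
      have h1 : (List.map (fun (n:Nat) => (n : Int)) S).Pairwise (· < ·) :=
        List.pairwise_map.mpr (hSsort.imp (fun {a b} h => by exact_mod_cast h))
      exact h1.imp (fun {a b} h => ne_of_lt h)
    have hofL : PySem.Set.ofList (((PySem.List.enumerate cps ((0:Nat):Int)).filter
          (fun jp => jp.2 < PySem.List.len ds)).map (fun jp => jp.2 + jp.1))
        = List.map (fun (n:Nat) => (n : Int)) S := by
      rw [hL]
      exact PySem.Set.ofList_eq_self_of_nodup _ hnodupL
    have hlenS : PySem.Set.len (List.map (fun (n:Nat) => (n : Int)) S) = (S.length : Int) := by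
      simp [PySem.Set.len]
    have hrange : PySem.List.pyRange 0 (PySem.List.len ds + (S.length : Int)) 1
        = List.map (fun (n:Nat) => (n : Int)) (List.range (ds.length + S.length)) := by
      rw [PySem.List.len_eq,
        show ((ds.length : Int) + (S.length : Int)) = ((ds.length + S.length : Nat) : Int) by push_cast; ring]
      exact PySem.List.pyRange_zero_nat _
    have hB : (((PySem.List.pyRange 0 (PySem.List.len ds +
          PySem.Set.len (PySem.Set.ofList (((PySem.List.enumerate cps ((0:Nat):Int)).filter
            (fun jp => jp.2 < PySem.List.len ds)).map (fun jp => jp.2 + jp.1)))) 1).foldl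
          (pvIntStepB (PySem.Set.ofList (((PySem.List.enumerate cps ((0:Nat):Int)).filter
            (fun jp => jp.2 < PySem.List.len ds)).map (fun jp => jp.2 + jp.1))) ds)
          ([], ((0:Nat):Int))).1) = pvOut ds S := by
      rw [hofL, hlenS, hrange, pvTransB S ds _ [] 0, pvMainB]
      rfl
    exact congrArg String.ofList (hA.trans hB.symm)
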